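-- pv_equiv track=rewrite | github.com/ernest-mm/Tic-Tac-Toe | displayResolution.py | checkSupportedResolutions
-- ===== SOURCE A (Python) =====
-- from typing import Optional
--
-- def checkSupportedResolutions(width: int, height: int, supportedDisplays: dict[tuple[int, int], str]) -> tuple[bool, bool, Optional[tuple[int, int]]]:
--     """
--     Check if the user's display resolution is supported
--     """
--
--     if (width, height) in supportedDisplays.keys():
--         resolutionKey = (width, height)
--         return True, True, resolutionKey
--     else:
--         resolutionKey = None
--
--     # Checking if only the width or the height is supported
--
--     widthIsSupported = any(width in key for key in supportedDisplays)
--     heightIsSupported = any(height in key for key in supportedDisplays)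
--
--     # Getting the height's or width's key
--
--     if widthIsSupported:
--         resolutionKey = next((key for key in supportedDisplays if width in key), None)
--     elif heightIsSupported:
--         resolutionKey = next((key for key in supportedDisplays if height in key), None)
--
--     return widthIsSupported, heightIsSupported, resolutionKey
-- ===== SOURCE B (Python) =====
-- def checkSupportedResolutions(width, height, supportedDisplays):
--     firstWidthKey = None
--     firstHeightKey = None
--     for key in supportedDisplays:
--         if key == (width, height):
--             return True, True, key
--         if firstWidthKey is None and width in key:
--             firstWidthKey = key
--         if firstHeightKey is None and height in key:
--             firstHeightKey = key
--     widthIsSupported = firstWidthKey is not None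
--     heightIsSupported = firstHeightKey is not None
--     resolutionKey = firstWidthKey if widthIsSupported else firstHeightKey
--     return widthIsSupported, heightIsSupported, resolutionKey
-- ===== Notes on version B (the rewrite author's own statement) =====
-- stated objective: simpler
-- what changed: Replaces A's exact-match membership test plus two any() scans plus up to two next() generator scans (up to five traversals of the dict) with a single loop that returns early on an exact key and records the first width-matching and first height-matching keys in accumulators.
import Mathlib
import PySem

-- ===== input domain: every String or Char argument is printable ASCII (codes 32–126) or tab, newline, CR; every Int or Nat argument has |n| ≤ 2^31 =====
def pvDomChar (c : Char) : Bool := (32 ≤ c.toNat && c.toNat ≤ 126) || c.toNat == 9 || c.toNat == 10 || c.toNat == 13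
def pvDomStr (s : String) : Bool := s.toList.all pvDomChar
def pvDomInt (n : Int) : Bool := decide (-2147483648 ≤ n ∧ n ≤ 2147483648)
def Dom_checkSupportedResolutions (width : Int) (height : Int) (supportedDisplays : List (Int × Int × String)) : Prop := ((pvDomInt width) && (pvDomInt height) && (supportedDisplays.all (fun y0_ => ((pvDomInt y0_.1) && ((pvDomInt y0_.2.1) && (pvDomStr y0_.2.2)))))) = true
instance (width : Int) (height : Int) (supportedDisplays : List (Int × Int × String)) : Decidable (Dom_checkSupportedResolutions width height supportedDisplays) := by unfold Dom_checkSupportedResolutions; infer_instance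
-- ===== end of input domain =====

-- B replaces A's up-to-five scans of the dict (membership test, two any(), two next())
-- by ONE loop with early return and two first-match accumulators (objective: simpler one-pass code).

-- ===== PORT A =====
def checkSupportedResolutions (width : Int) (height : Int) (supportedDisplays : List (Int × Int × String)) : Bool × Bool × (Option (Int × Int)) :=
  -- `(width, height) in supportedDisplays.keys()`
  if supportedDisplays.any (fun k => k.1 == width && k.2.1 == height) then
    (true, true, some (width, height))
  else
    -- `any(width in key for key in supportedDisplays)` — tuple membership tests both coordinates
    let widthIsSupported := supportedDisplays.any (fun k => k.1 == width || k.2.1 == width)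
    let heightIsSupported := supportedDisplays.any (fun k => k.1 == height || k.2.1 == height)
    -- `next((key for key in ...), None)` = first matching key
    let resolutionKey : Option (Int × Int) :=
      if widthIsSupported then
        (supportedDisplays.find? (fun k => k.1 == width || k.2.1 == width)).map (fun k => (k.1, k.2.1))
      else if heightIsSupported then
        (supportedDisplays.find? (fun k => k.1 == height || k.2.1 == height)).map (fun k => (k.1, k.2.1))
      else none
    (widthIsSupported, heightIsSupported, resolutionKey)

-- ===== PORT B =====
-- the single for-loop of Source B, with the two accumulators as recursion state
def csrAltGo (width : Int) (height : Int) (firstWidthKey firstHeightKey : Option (Int × Int)) :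
    List (Int × Int × String) → Bool × Bool × (Option (Int × Int))
  | [] =>
    (firstWidthKey.isSome, firstHeightKey.isSome,
     if firstWidthKey.isSome then firstWidthKey else firstHeightKey)
  | k :: rest =>
    if k.1 == width && k.2.1 == height then (true, true, some (width, height))
    else
      let fw := if firstWidthKey.isNone && (k.1 == width || k.2.1 == width) then some (k.1, k.2.1) else firstWidthKey
      let fh := if firstHeightKey.isNone && (k.1 == height || k.2.1 == height) then some (k.1, k.2.1) else firstHeightKey
      csrAltGo width height fw fh rest

def checkSupportedResolutions_alt (width : Int) (height : Int) (supportedDisplays : List (Int × Int × String)) : Bool × Bool × (Option (Int × Int)) :=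
  csrAltGo width height none none supportedDisplays

-- ===== PRECONDITION & SPEC =====
def Spec_checkSupportedResolutions (width : Int) (height : Int) (supportedDisplays : List (Int × Int × String)) (out : Bool × Bool × (Option (Int × Int))) : Prop := out = checkSupportedResolutions_alt width height supportedDisplays
instance (width : Int) (height : Int) (supportedDisplays : List (Int × Int × String)) (out : Bool × Bool × (Option (Int × Int))) : Decidable (Spec_checkSupportedResolutions width height supportedDisplays out) := by unfold Spec_checkSupportedResolutions; infer_instance

-- ===== CLAIM (what is proved, stated in full; the proofs are below) =====
def Claim_equal_checkSupportedResolutions : Prop := ∀ (width : Int) (height : Int) (supportedDisplays : List (Int × Int × String)), Dom_checkSupportedResolutions width height supportedDisplays → Spec_checkSupportedResolutions width height supportedDisplays (checkSupportedResolutions width height supportedDisplays)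

-- ===== LEMMAS AND PROOFS =====

-- characterisation of the one-pass loop for arbitrary accumulator state
theorem csrAltGo_eq (width height : Int) (sd : List (Int × Int × String))
    (fw fh : Option (Int × Int)) :
    csrAltGo width height fw fh sd =
      if sd.any (fun k => k.1 == width && k.2.1 == height) then (true, true, some (width, height))
      else
        let FW := fw.or ((sd.find? (fun k => k.1 == width || k.2.1 == width)).map (fun k => (k.1, k.2.1)))
        let FH := fh.or ((sd.find? (fun k => k.1 == height || k.2.1 == height)).map (fun k => (k.1, k.2.1)))
        (FW.isSome, FH.isSome, if FW.isSome then FW else FH) := by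
  induction sd generalizing fw fh with
  | nil => cases fw <;> cases fh <;> simp [csrAltGo]
  | cons k rest ih =>
    by_cases hex : (k.1 == width && k.2.1 == height) = true
    · simp [csrAltGo, hex, List.any_cons]
    · simp only [csrAltGo, hex, Bool.false_eq_true, if_false, ih, List.any_cons,
        List.find?_cons, Bool.false_or]
      cases hw : (k.1 == width || k.2.1 == width) <;>
      cases hh : (k.1 == height || k.2.1 == height) <;>
      cases fw <;> cases fh <;> (try simp [hw, hh, Option.or]) <;> rfl

theorem csr_eq (width height : Int) (sd : List (Int × Int × String)) :
    checkSupportedResolutions width height sd = checkSupportedResolutions_alt width height sd := by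
  rw [checkSupportedResolutions_alt, csrAltGo_eq, checkSupportedResolutions]
  by_cases hex : (sd.any (fun k => k.1 == width && k.2.1 == height)) = true
  · simp [hex]
  · simp only [hex, Bool.false_eq_true, if_false, Option.none_or]
    have hw : (sd.any (fun k => k.1 == width || k.2.1 == width)) =
        ((sd.find? (fun k => k.1 == width || k.2.1 == width)).map (fun k => (k.1, k.2.1))).isSome := by
      rw [Option.isSome_map, List.isSome_find?]
    have hh : (sd.any (fun k => k.1 == height || k.2.1 == height)) =
        ((sd.find? (fun k => k.1 == height || k.2.1 == height)).map (fun k => (k.1, k.2.1))).isSome := by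
      rw [Option.isSome_map, List.isSome_find?]
    rw [hw, hh]
    split_ifs with h1 h2
    · rfl
    · rfl
    · rw [Option.not_isSome_iff_eq_none] at h2; rw [h2]

-- ===== VERDICT (by name: the statement is the Claim_ definition above) =====
theorem checkSupportedResolutions_spec : Claim_equal_checkSupportedResolutions := by
  intro w h sd _
  exact csr_eq w h sd
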